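-- pv_equiv track=rewrite | github.com/fibonacciyys/mypy | pylearn/example_100/30.py | is_hws
-- ===== SOURCE A (Python) =====
-- def is_hws(n):
--     ls=[]
--     while(n):
--         x=n%10
--         ls.append(x)
--         n//=10
--     or_ls=ls[::-1]
--     if or_ls==ls:
--         return True
--     else:
--         return False
-- ===== SOURCE B (Python) =====
-- def is_hws(n):
--     m = n
--     rev = 0
--     while m:
--         rev = rev * 10 + m % 10
--         m //= 10
--     return rev == n
-- ===== Notes on version B (the rewrite author's own statement) =====
-- stated objective: idiomatic
-- what changed: B reverses the number arithmetically in a single integer accumulator and compares rev == n, instead of building a digit list and comparing it with its reversed copy.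
import Mathlib
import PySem

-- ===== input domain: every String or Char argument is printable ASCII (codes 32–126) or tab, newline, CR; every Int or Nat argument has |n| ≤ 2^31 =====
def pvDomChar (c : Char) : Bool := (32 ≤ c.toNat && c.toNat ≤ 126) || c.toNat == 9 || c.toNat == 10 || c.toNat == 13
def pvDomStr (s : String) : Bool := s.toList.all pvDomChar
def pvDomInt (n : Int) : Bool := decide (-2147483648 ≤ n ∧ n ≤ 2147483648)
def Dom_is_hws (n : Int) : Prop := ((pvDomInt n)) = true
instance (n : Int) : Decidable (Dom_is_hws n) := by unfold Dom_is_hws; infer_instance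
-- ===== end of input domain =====

-- B reverses the number arithmetically in one integer accumulator instead of building a digit list; equal on all n ≥ 0 (both Pythons loop forever on n < 0).

-- ===== PORT A =====
-- the while loop, fueled (n.toNat bounds the iteration count for n ≥ 0; Python diverges for n < 0, excluded by Pre_)
def isHwsLoop : Nat → Int → List Int → List Int
  | 0, _, ls => ls
  | f + 1, n, ls =>
    if n ≠ 0 then isHwsLoop f (PySem.Int.floordiv n 10) (ls ++ [PySem.Int.mod n 10]) else ls

def is_hws (n : Int) : Bool :=
  let ls := isHwsLoop n.toNat n []
  let or_ls := ls.reverse        -- ls[::-1]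
  if or_ls = ls then true else false

-- ===== PORT B =====
-- while m: rev = rev*10 + m%10; m //= 10  — fueled the same way
def revLoop : Nat → Int → Int → Int
  | 0, _, rev => rev
  | f + 1, m, rev =>
    if m ≠ 0 then revLoop f (PySem.Int.floordiv m 10) (rev * 10 + PySem.Int.mod m 10) else rev

def is_hws_alt (n : Int) : Bool := decide (revLoop n.toNat n 0 = n)

-- ===== PRECONDITION & SPEC =====
-- Pre_ excludes n < 0, on which BOTH Pythons loop forever (n //= 10 stalls at -1), so A never returns there.
def Pre_is_hws (n : Int) : Prop := 0 ≤ n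
instance (n : Int) : Decidable (Pre_is_hws n) := by unfold Pre_is_hws; infer_instance
def pvWitness_is_hws : Int := (121)
def Spec_is_hws (n : Int) (out : Bool) : Prop := out = is_hws_alt n
instance (n : Int) (out : Bool) : Decidable (Spec_is_hws n out) := by unfold Spec_is_hws; infer_instance

-- ===== CLAIM (what is proved, stated in full; the proofs are below) =====
def Claim_equal_is_hws : Prop := ∀ (n : Int), Dom_is_hws n → Pre_is_hws n → Spec_is_hws n (is_hws n)

-- ===== LEMMAS AND PROOFS =====

-- digit list of a nonnegative number, least-significant first (the list A's loop builds)
def digitsN : Nat → List Int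
  | 0 => []
  | m + 1 => ((((m + 1) % 10 : Nat)) : Int) :: digitsN ((m + 1) / 10)
decreasing_by exact Nat.div_lt_self (Nat.succ_pos m) (by norm_num)

theorem digitsN_pos (m : Nat) (h : m ≠ 0) :
    digitsN m = (((m % 10 : Nat)) : Int) :: digitsN (m / 10) := by
  cases m with
  | zero => exact absurd rfl h
  | succ k => rw [digitsN]

theorem isHwsLoop_eq (fuel : Nat) : ∀ (m : Nat) (ls : List Int), m ≤ fuel →
    isHwsLoop fuel (m : Int) ls = ls ++ digitsN m := by
  induction fuel with
  | zero =>
    intro m ls h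
    have : m = 0 := Nat.le_zero.mp h
    subst this
    simp [isHwsLoop, digitsN]
  | succ f ih =>
    intro m ls h
    by_cases hm : m = 0
    · subst hm; simp [isHwsLoop, digitsN]
    · have hcast : ((m : Int) ≠ 0) := by exact_mod_cast hm
      rw [isHwsLoop, if_pos hcast]
      have hdiv : PySem.Int.floordiv (m : Int) 10 = ((m / 10 : Nat) : Int) := by
        exact_mod_cast PySem.Int.floordiv_natCast m 10
      have hmod : PySem.Int.mod (m : Int) 10 = ((m % 10 : Nat) : Int) := by
        exact_mod_cast PySem.Int.mod_natCast m 10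
      have hlt : m / 10 < m := Nat.div_lt_self (Nat.pos_of_ne_zero hm) (by norm_num)
      rw [hdiv, hmod, ih (m / 10) _ (by omega)]
      rw [digitsN_pos m hm]; simp

theorem revLoop_eq (fuel : Nat) : ∀ (m : Nat) (rev : Int), m ≤ fuel →
    revLoop fuel (m : Int) rev = (digitsN m).foldl (fun a d => a * 10 + d) rev := by
  induction fuel with
  | zero =>
    intro m rev h
    have : m = 0 := Nat.le_zero.mp h
    subst this
    simp [revLoop, digitsN]
  | succ f ih =>
    intro m rev h
    by_cases hm : m = 0
    · subst hm; simp [revLoop, digitsN]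
    · have hcast : ((m : Int) ≠ 0) := by exact_mod_cast hm
      rw [revLoop, if_pos hcast]
      have hdiv : PySem.Int.floordiv (m : Int) 10 = ((m / 10 : Nat) : Int) := by
        exact_mod_cast PySem.Int.floordiv_natCast m 10
      have hmod : PySem.Int.mod (m : Int) 10 = ((m % 10 : Nat) : Int) := by
        exact_mod_cast PySem.Int.mod_natCast m 10
      have hlt : m / 10 < m := Nat.div_lt_self (Nat.pos_of_ne_zero hm) (by norm_num)
      rw [hdiv, hmod, ih (m / 10) _ (by omega)]
      rw [digitsN_pos m hm]
      simp [List.foldl]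

def valR (L : List Int) : Int := L.foldr (fun d a => a * 10 + d) 0

theorem valR_digitsN (m : Nat) : valR (digitsN m) = (m : Int) := by
  induction m using Nat.strong_induction_on with
  | _ m ih =>
    by_cases hm : m = 0
    · subst hm; simp [digitsN, valR]
    · rw [digitsN_pos m hm]
      simp only [valR, List.foldr]
      rw [show (digitsN (m / 10)).foldr (fun d a => a * 10 + d) 0 = valR (digitsN (m / 10)) from rfl,
        ih (m / 10) (Nat.div_lt_self (Nat.pos_of_ne_zero hm) (by norm_num))]
      have := Nat.div_add_mod m 10
      push_cast
      omega

theorem digitsN_bounds (m : Nat) : ∀ d ∈ digitsN m, 0 ≤ d ∧ d < 10 := by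
  induction m using Nat.strong_induction_on with
  | _ m ih =>
    by_cases hm : m = 0
    · subst hm; simp [digitsN]
    · rw [digitsN_pos m hm]
      intro d hd
      rcases List.mem_cons.mp hd with h | h
      · subst h
        constructor
        · positivity
        · exact_mod_cast Nat.mod_lt m (by norm_num)
      · exact ih (m / 10) (Nat.div_lt_self (Nat.pos_of_ne_zero hm) (by norm_num)) d h

theorem valR_nonneg (L : List Int) (h : ∀ d ∈ L, 0 ≤ d) : 0 ≤ valR L := by
  induction L with
  | nil => simp [valR]
  | cons x xs ih =>
    have hx := h x (List.mem_cons_self)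
    have hxs : 0 ≤ valR xs := ih (fun d hd => h d (List.mem_cons_of_mem _ hd))
    simp only [valR, List.foldr] at *
    nlinarith

theorem valR_inj : ∀ (L M : List Int), L.length = M.length →
    (∀ d ∈ L, 0 ≤ d ∧ d < 10) → (∀ d ∈ M, 0 ≤ d ∧ d < 10) →
    valR L = valR M → L = M := by
  intro L
  induction L with
  | nil =>
    intro M hlen _ _ _
    exact (List.length_eq_zero_iff.mp hlen.symm).symm
  | cons x xs ih =>
    intro M hlen hL hM hval
    cases M with
    | nil => simp at hlen
    | cons y ys =>
      have hx := hL x (List.mem_cons_self)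
      have hy := hM y (List.mem_cons_self)
      have hxs : 0 ≤ valR xs := valR_nonneg xs (fun d hd => (hL d (List.mem_cons_of_mem _ hd)).1)
      have hys : 0 ≤ valR ys := valR_nonneg ys (fun d hd => (hM d (List.mem_cons_of_mem _ hd)).1)
      simp only [valR, List.foldr] at hval
      have hveq : (xs.foldr (fun d a => a * 10 + d) 0) = (ys.foldr (fun d a => a * 10 + d) 0) ∧ x = y := by
        simp only [valR] at hxs hys
        constructor <;> omega
      have hxy : x = y := hveq.2
      have hrest : xs = ys := ih ys (by simpa using hlen)
        (fun d hd => hL d (List.mem_cons_of_mem _ hd))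
        (fun d hd => hM d (List.mem_cons_of_mem _ hd)) hveq.1
      rw [hxy, hrest]

theorem foldl_eq_valR_reverse (L : List Int) :
    L.foldl (fun a d => a * 10 + d) 0 = valR L.reverse := by
  rw [valR, List.foldr_reverse]

-- ===== VERDICT (by name: the statement is the Claim_ definition above) =====
theorem is_hws_spec : Claim_equal_is_hws := by
  intro n _ hpre
  obtain ⟨m, rfl⟩ := Int.eq_ofNat_of_zero_le hpre
  unfold Spec_is_hws is_hws is_hws_alt
  have htn : ((m : Int)).toNat = m := Int.toNat_natCast m
  rw [htn, isHwsLoop_eq m m [] (le_refl m), revLoop_eq m m 0 (le_refl m)]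
  simp only [List.nil_append]
  set L := digitsN m with hL
  have hrev : L.foldl (fun a d => a * 10 + d) 0 = valR L.reverse := foldl_eq_valR_reverse L
  have hval : valR L = (m : Int) := valR_digitsN m
  have hbounds := digitsN_bounds m
  rw [← hL] at hbounds
  by_cases hpal : L.reverse = L
  · rw [if_pos hpal]
    rw [hrev, hpal, hval]
    simp
  · rw [if_neg hpal, hrev, ← hval]
    have hne : valR L.reverse ≠ valR L := by
      intro h
      exact hpal (valR_inj L.reverse L (by simp)
        (fun d hd => hbounds d (List.mem_reverse.mp hd)) hbounds h)
    simp [hne]
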